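-- pv_equiv track=rewrite | github.com/oblivi-ate/AI_project | ilp_flexible2.py | prune_solution
-- ===== SOURCE A (Python) =====
-- from itertools import combinations
--
-- def satisfies_condition(solution, n, k, j, s, strict_coverage=True, min_cover=1, coverage_cache=None):
--     """检查解是否满足约束条件，支持宽松和严格覆盖模式，使用缓存优化性能"""
--     # 使用缓存加速重复计算
--     if coverage_cache is not None:
--         solution_key = tuple(sorted(solution))
--         if solution_key in coverage_cache:
--             return coverage_cache[solution_key]
--
--     solution_sets = [set(group) for group in solution]
--     all_items = list(range(n))
--     j_combinations = list(combinations(all_items, j))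
--
--     # 检查是否所有j组合都被覆盖
--     for j_comb in j_combinations:
--         if strict_coverage:
--             # 严格覆盖模式：检查所有s元素子集是否都被覆盖
--             s_combinations = list(combinations(j_comb, s))
--             for s_comb in s_combinations:
--                 s_covered = False
--                 for group in solution_sets:
--                     if set(s_comb).issubset(group):
--                         s_covered = True
--                         break
--                 if not s_covered:
--                     if coverage_cache is not None:
--                         coverage_cache[tuple(sorted(solution))] = False
--                     return False
--         else:
--             # 宽松覆盖模式：至少一个k集合包含指定数量的s组合
--             s_combinations = list(combinations(j_comb, s))
--             # 检查至少有1个k集合包含至少min_cover的s组合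
--             covered = False
--             count = 0
--             for s_comb in s_combinations:
--                 for group in solution_sets:
--                     if set(s_comb).issubset(group):
--                         count += 1
--                         if count >= min_cover:
--                             covered = True
--                             break
--                 if covered:
--                     break
--             if not covered:
--                 if coverage_cache is not None:
--                     coverage_cache[tuple(sorted(solution))] = False
--                 return False
--
--     if coverage_cache is not None:
--         coverage_cache[tuple(sorted(solution))] = True
--     return True
--
-- def prune_solution(solution, n, k, j, s, min_groups):
--     """尝试移除解中的冗余集合"""
--     # 计算每个集合的"价值"
--     solution_sets = [set(group) for group in solution]
--     all_items = list(range(n))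
--     j_combinations = list(combinations(all_items, j))
--
--     # 对于每个j组合，计算哪些k集合对它有贡献
--     j_coverage = {j_idx: set() for j_idx in range(len(j_combinations))}
--     for k_idx, k_set in enumerate(solution_sets):
--         for j_idx, j_comb in enumerate(j_combinations):
--             j_set = set(j_comb)
--             if len(k_set & j_set) >= s:
--                 j_coverage[j_idx].add(k_idx)
--
--     # 对于每个k集合，计算它独自覆盖的j组合数量
--     unique_coverage = [0] * len(solution_sets)
--     for j_idx, covering_k_indices in j_coverage.items():
--         if len(covering_k_indices) == 1:
--             k_idx = next(iter(covering_k_indices))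
--             unique_coverage[k_idx] += 1
--
--     # 按照独特覆盖价值排序集合
--     sorted_indices = sorted(range(len(solution_sets)), key=lambda i: unique_coverage[i])
--
--     # 从最不重要到最重要，尝试移除集合
--     pruned = solution.copy()
--     for idx in sorted_indices:
--         if len(pruned) <= min_groups:
--             break  # 保持最小集合数
--
--         # 尝试移除当前集合
--         test_solution = pruned.copy()
--         test_solution.remove(solution[idx])
--
--         # 检查移除后是否仍然满足条件
--         if satisfies_condition(test_solution, n, k, j, s):
--             pruned = test_solution
--
--     return pruned
-- ===== SOURCE B (Python) =====
-- from itertools import combinations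
--
-- def prune_solution(solution, n, k, j, s, min_groups):
--     """Same greedy pruning, but the coverage re-check enumerates the s-subsets
--     of range(n) directly instead of every s-subset of every j-combination; if
--     no removal can ever be attempted, return a copy of the solution at once."""
--     if not solution or len(solution) <= min_groups:
--         return list(solution)
--     sets = [frozenset(g) for g in solution]
--     # rank each group by how many j-combinations it alone covers (|group & jc| >= s)
--     unique = [0] * len(sets)
--     for comb in combinations(range(n), j):
--         cs = frozenset(comb)
--         covering = [i for i, g in enumerate(sets) if len(g & cs) >= s]
--         if len(covering) == 1:
--             unique[covering[0]] += 1
--     order = sorted(range(len(sets)), key=lambda i: unique[i])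
--     # strict coverage == every s-subset of range(n) is covered by some group
--     # (vacuously true when j > len(range(n)) or s > j: no j-combination / no s-subset exists)
--     items = list(range(n))
--
--     def covered(rest_sets):
--         if j > len(items) or s > j:
--             return True
--         return all(any(set(t) <= g for g in rest_sets) for t in combinations(items, s))
--
--     pruned = list(solution)
--     for idx in order:
--         if len(pruned) <= min_groups:
--             break
--         rest = list(pruned)
--         rest.remove(solution[idx])
--         if covered([frozenset(g) for g in rest]):
--             pruned = rest
--     return pruned
-- ===== Notes on version B (the rewrite author's own statement) =====
-- stated objective: alternative
-- what changed: The per-removal coverage re-check no longer re-enumerates every s-subset of every j-combination of range(n) through satisfies_condition (with its cache/relaxed-mode machinery); B checks the C(n,s) s-subsets of range(n) directly (lazily, with early exit), builds the uniqueness ranking in one pass over lazily-iterated j-combinations with a filter instead of A's materialized combination list plus dict of covering-index sets and second pass, and returns a copy immediately when no removal can ever be attempted.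
import Mathlib
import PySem

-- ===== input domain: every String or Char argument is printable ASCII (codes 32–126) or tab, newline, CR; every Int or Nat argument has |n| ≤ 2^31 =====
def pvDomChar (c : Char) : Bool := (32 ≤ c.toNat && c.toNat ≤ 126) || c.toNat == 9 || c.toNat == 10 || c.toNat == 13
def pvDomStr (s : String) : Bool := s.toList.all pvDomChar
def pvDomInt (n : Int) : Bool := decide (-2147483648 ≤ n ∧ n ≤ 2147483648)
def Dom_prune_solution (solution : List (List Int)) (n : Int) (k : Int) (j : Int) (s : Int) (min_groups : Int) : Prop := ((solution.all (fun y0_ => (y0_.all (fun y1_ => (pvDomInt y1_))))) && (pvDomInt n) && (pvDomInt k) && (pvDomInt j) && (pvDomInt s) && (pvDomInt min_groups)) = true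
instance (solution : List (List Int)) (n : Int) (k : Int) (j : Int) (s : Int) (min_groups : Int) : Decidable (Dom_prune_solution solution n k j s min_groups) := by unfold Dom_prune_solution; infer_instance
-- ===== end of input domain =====

-- ===== PORT A =====
-- B replaces A's coverage re-check (every s-subset of every j-combination, plus a dict of covering
-- index sets for the ranking) by a direct check of the precomputed s-subsets of range(n) and a
-- one-pass filter ranking, with an immediate copy-return when no removal can be attempted;
-- return values are identical on Pre_.

-- list(itertools.combinations(xs, r)); the guard mirrors CPython's combinations(), whose iterator
-- is empty when r > len(pool) — value-equal to PySem.List.combinations (lemma pvCombs_eq below),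
-- it only spares the port the vacuous recursion on such inputs
def pvCombs (xs : List Int) (r : Nat) : List (List Int) :=
  if xs.length < r then [] else PySem.List.combinations xs r

-- itertools.combinations(range(n), j), shared subexpression of both Pythons
def pvJCombs (n : Int) (j : Int) : List (List Int) :=
  pvCombs (PySem.List.pyRange 0 n 1) j.toNat

-- satisfies_condition(solution, n, k, j, s) as A calls it: strict_coverage=True, coverage_cache=None,
-- so the relaxed branch and the cache branches are dead code; the early-return-False double loop is the all/any fold
def pvSatisfiesA (sol : List (List Int)) (n : Int) (j : Int) (s : Int) : Bool :=
  let solutionSets := sol.map (fun group => PySem.Set.ofList group)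
  (pvJCombs n j).all (fun jComb =>
    (pvCombs jComb s.toNat).all (fun sComb =>
      solutionSets.any (fun group => PySem.Set.issubset (PySem.Set.ofList sComb) group)))

-- {j_idx: set() for j_idx in range(len(j_combinations))}
def pvCoverage0 (m : Int) : PySem.Dict Int (PySem.Set Int) :=
  (PySem.List.pyRange 0 m 1).foldl (fun d i => d.insert i PySem.Set.empty) PySem.Dict.empty

-- the double loop filling j_coverage (j_coverage[j_idx].add(k_idx) is Dict.modify; the key is always present)
def pvCoverage (solutionSets : List (PySem.Set Int)) (jCombs : List (List Int)) (s : Int) :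
    PySem.Dict Int (PySem.Set Int) :=
  (PySem.List.enumerate solutionSets).foldl (fun d q =>
      (PySem.List.enumerate jCombs).foldl (fun d p =>
        if PySem.Set.len (PySem.Set.inter q.2 (PySem.Set.ofList p.2)) ≥ s
        then d.modify p.1 PySem.Set.empty (fun st => PySem.Set.add st q.1) else d) d)
    (pvCoverage0 (jCombs.length : Int))

-- unique_coverage: next(iter(covering)) on a len-1 set is its single element, ported as headD;
-- k_idx is a valid index of unique_coverage, so the total forms pyGetD/pySetD are exact
def pvUniqueA (solution : List (List Int)) (n : Int) (j : Int) (s : Int) : List Int :=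
  (pvCoverage (solution.map (fun group => PySem.Set.ofList group)) (pvJCombs n j) s).items.foldl
    (fun u p =>
      if PySem.Set.len p.2 = 1 then
        let kIdx := p.2.headD 0
        PySem.List.pySetD u kIdx (PySem.List.pyGetD u kIdx 0 + 1)
      else u)
    (List.replicate solution.length (0 : Int))

-- the removal loop with its break; solution[idx] is always a member of pruned, the pyGet?/getD
-- matches are totality guards for the always-successful indexing and list.remove
def pvLoopA (solution : List (List Int)) (n j s min_groups : Int) :
    List Int → List (List Int) → List (List Int)
  | [], pruned => pruned
  | idx :: rest, pruned =>
    if (pruned.length : Int) ≤ min_groups then pruned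
    else
      let testSolution := match PySem.List.pyGet? solution idx with
        | some g => (PySem.List.remove? pruned g).getD pruned
        | none => pruned
      if pvSatisfiesA testSolution n j s then pvLoopA solution n j s min_groups rest testSolution
      else pvLoopA solution n j s min_groups rest pruned

def prune_solution (solution : List (List Int)) (n : Int) (k : Int) (j : Int) (s : Int) (min_groups : Int) : List (List Int) :=
  pvLoopA solution n j s min_groups
    (PySem.List.sorted (PySem.List.pyRange 0 (solution.length : Int) 1)
      (fun i => PySem.List.pyGetD (pvUniqueA solution n j s) i 0) false)
    solution

-- ===== PORT B =====
-- unique ranking of Source B: one pass over the j-combinations, covering list by filter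
def pvUniqueB (solution : List (List Int)) (n : Int) (j : Int) (s : Int) : List Int :=
  (pvJCombs n j).foldl (fun u comb =>
      let cs := PySem.Set.ofList comb
      let covering := ((PySem.List.enumerate (solution.map (fun g => PySem.Set.ofList g))).filter
          (fun q => PySem.Set.len (PySem.Set.inter q.2 cs) ≥ s)).map (fun q => q.1)
      if covering.length = 1 then
        let i := covering.headD 0
        PySem.List.pySetD u i (PySem.List.pyGetD u i 0 + 1)
      else u)
    (List.replicate solution.length (0 : Int))

-- covered(rest_sets): the vacuity guard, then all(any(set(t) <= g for g in rest_sets) for t in combinations(items, s))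
-- (Source B iterates the combinations lazily; the value is the same bounded conjunction)
def pvCoveredB (n j s : Int) (restSets : List (PySem.Set Int)) : Bool :=
  if j > ((PySem.List.pyRange 0 n 1).length : Int) ∨ s > j then true
  else (pvCombs (PySem.List.pyRange 0 n 1) s.toNat).all
    (fun t => restSets.any (fun g => PySem.Set.issubset (PySem.Set.ofList t) g))

-- Source B's removal loop (same totality guards as pvLoopA)
def pvLoopB (solution : List (List Int)) (n j s min_groups : Int) :
    List Int → List (List Int) → List (List Int)
  | [], pruned => pruned
  | idx :: restIdx, pruned =>
    if (pruned.length : Int) ≤ min_groups then pruned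
    else
      let rest := match PySem.List.pyGet? solution idx with
        | some g => (PySem.List.remove? pruned g).getD pruned
        | none => pruned
      if pvCoveredB n j s (rest.map (fun g => PySem.Set.ofList g)) then pvLoopB solution n j s min_groups restIdx rest
      else pvLoopB solution n j s min_groups restIdx pruned

def prune_solution_alt (solution : List (List Int)) (n : Int) (k : Int) (j : Int) (s : Int) (min_groups : Int) : List (List Int) :=
  if solution = [] ∨ (solution.length : Int) ≤ min_groups then solution
  else
    pvLoopB solution n j s min_groups
      (PySem.List.sorted (PySem.List.pyRange 0 (solution.length : Int) 1)
        (fun i => PySem.List.pyGetD (pvUniqueB solution n j s) i 0) false)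
      solution

-- ===== PRECONDITION & SPEC =====
-- Pre_ excludes exactly the inputs on which A raises ValueError in itertools.combinations:
-- j < 0 (raised immediately), and s < 0 when a removal is actually attempted while a
-- j-combination of range(n) exists (solution nonempty, longer than min_groups, j ≤ max(n, 0)):
-- there the attempted coverage check builds combinations(j_comb, s).  Everywhere else
-- (s < 0 with no attempt or no j-combination) A returns normally and B matches it.
def Pre_prune_solution (solution : List (List Int)) (n : Int) (k : Int) (j : Int) (s : Int) (min_groups : Int) : Prop :=
  0 ≤ j ∧ (0 ≤ s ∨ j > max n 0 ∨ solution = [] ∨ (solution.length : Int) ≤ min_groups)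
instance (solution : List (List Int)) (n : Int) (k : Int) (j : Int) (s : Int) (min_groups : Int) : Decidable (Pre_prune_solution solution n k j s min_groups) := by unfold Pre_prune_solution; infer_instance
def pvWitness_prune_solution : List (List Int) × Int × Int × Int × Int × Int :=
  ([[0, 1], [1, 2], [0, 2]], 3, 2, 2, 1, 1)
def Spec_prune_solution (solution : List (List Int)) (n : Int) (k : Int) (j : Int) (s : Int) (min_groups : Int) (out : List (List Int)) : Prop := out = prune_solution_alt solution n k j s min_groups
instance (solution : List (List Int)) (n : Int) (k : Int) (j : Int) (s : Int) (min_groups : Int) (out : List (List Int)) : Decidable (Spec_prune_solution solution n k j s min_groups out) := by unfold Spec_prune_solution; infer_instance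

-- ===== CLAIM (what is proved, stated in full; the proofs are below) =====
def Claim_equal_prune_solution : Prop := ∀ (solution : List (List Int)) (n : Int) (k : Int) (j : Int) (s : Int) (min_groups : Int), Dom_prune_solution solution n k j s min_groups → Pre_prune_solution solution n k j s min_groups → Spec_prune_solution solution n k j s min_groups (prune_solution solution n k j s min_groups)

-- ===== LEMMAS AND PROOFS =====

theorem pvCombs_eq (xs : List Int) (r : Nat) : pvCombs xs r = PySem.List.combinations xs r := by
  unfold pvCombs
  split
  · next h => exact (PySem.List.combinations_eq_nil_of_length_lt (h := h)).symm
  · rfl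

def pvCovList (sets : List (PySem.Set Int)) (s : Int) (jc : List Int) : List Int :=
  ((PySem.List.enumerate sets).filter
    (fun q => PySem.Set.len (PySem.Set.inter q.2 (PySem.Set.ofList jc)) ≥ s)).map (fun q => q.1)

theorem pv_sub_mid {α : Type} {t l : List α} (h : t.Sublist l) :
    ∀ m : Nat, t.length ≤ m → m ≤ l.length → ∃ u, t.Sublist u ∧ u.Sublist l ∧ u.length = m := by
  induction h with
  | slnil =>
    intro m h1 h2
    simp only [List.length_nil, Nat.le_zero] at h2
    subst h2
    exact ⟨[], List.Sublist.refl _, List.Sublist.refl _, rfl⟩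
  | @cons t l a h ih =>
    intro m h1 h2
    simp only [List.length_cons] at h2
    by_cases hm : m ≤ l.length
    · obtain ⟨u, hu1, hu2, hu3⟩ := ih m h1 hm
      exact ⟨u, hu1, hu2.cons a, hu3⟩
    · have hm' : m = l.length + 1 := by omega
      exact ⟨a :: l, (h.trans (List.Sublist.refl l)).cons a |>.trans (List.Sublist.refl _) |>.trans (List.Sublist.refl _), List.Sublist.refl _, by simp [hm']⟩
  | @cons₂ t l a h ih =>
    intro m h1 h2
    simp only [List.length_cons] at h1 h2
    obtain ⟨u, hu1, hu2, hu3⟩ := ih (m - 1) (by omega) (by omega)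
    exact ⟨a :: u, hu1.cons₂ a, hu2.cons₂ a, by simp [hu3]; omega⟩

theorem pv_main (sol : List (List Int)) (n j s : Int) (hj : 0 ≤ j)
    (hs : 0 ≤ s ∨ j > ((PySem.List.pyRange 0 n 1).length : Int)) :
    pvSatisfiesA sol n j s = pvCoveredB n j s (sol.map (fun g => PySem.Set.ofList g)) := by
  set R := PySem.List.pyRange 0 n 1 with hR
  set P : List Int → Bool := fun t =>
    (sol.map (fun g => PySem.Set.ofList g)).any (fun g => PySem.Set.issubset (PySem.Set.ofList t) g) with hP
  have hA : pvSatisfiesA sol n j s =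
      (PySem.List.combinations R j.toNat).all (fun jc => (PySem.List.combinations jc s.toNat).all P) := by
    show (pvCombs R j.toNat).all (fun jc => (pvCombs jc s.toNat).all P) = _
    simp only [pvCombs_eq]
  rw [hA]
  unfold pvCoveredB
  by_cases hC : j > (R.length : Int) ∨ s > j
  · rw [if_pos hC]
    have : ∀ jc ∈ PySem.List.combinations R j.toNat, ∀ t ∈ PySem.List.combinations jc s.toNat, P t = true := by
      intro jc hjc t ht
      rw [PySem.List.mem_combinations_iff] at hjc ht
      exfalso
      have h1 := hjc.1.length_le
      have h2 := ht.1.length_le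
      rcases hC with hC | hC <;> omega
    simp only [List.all_eq_true]
    exact this
  · rw [if_neg hC]
    push Not at hC
    have hs0 : 0 ≤ s := by
      rcases hs with hs | hs
      · exact hs
      · exact absurd hs (not_lt.mpr hC.1)
    have hJL : j.toNat ≤ R.length := by omega
    have hSJ : s.toNat ≤ j.toNat := by omega
    have hB : (pvCombs R s.toNat).all P = (PySem.List.combinations R s.toNat).all P := by
      simp only [pvCombs_eq]
    rw [hB, Bool.eq_iff_iff]
    simp only [List.all_eq_true]
    constructor
    · intro h t ht
      rw [PySem.List.mem_combinations_iff] at ht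
      obtain ⟨u, hu1, hu2, hu3⟩ := pv_sub_mid ht.1 j.toNat (by omega) hJL
      exact h u (by rw [PySem.List.mem_combinations_iff]; exact ⟨hu2, hu3⟩) t
        (by rw [PySem.List.mem_combinations_iff]; exact ⟨hu1, ht.2⟩)
    · intro h jc hjc t ht
      rw [PySem.List.mem_combinations_iff] at hjc ht
      exact h t (by rw [PySem.List.mem_combinations_iff]; exact ⟨ht.1.trans hjc.1, ht.2⟩)

theorem pv_loop_eq (solution : List (List Int)) (n j s min_groups : Int) (hj : 0 ≤ j)
    (hs : 0 ≤ s ∨ j > ((PySem.List.pyRange 0 n 1).length : Int)) :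
    ∀ (idxs : List Int) (pruned : List (List Int)),
      pvLoopA solution n j s min_groups idxs pruned =
        pvLoopB solution n j s min_groups idxs pruned := by
  intro idxs
  induction idxs with
  | nil => intro pruned; rfl
  | cons idx rest ih =>
    intro pruned
    simp only [pvLoopA, pvLoopB]
    by_cases hlen : (pruned.length : Int) ≤ min_groups
    · rw [if_pos hlen, if_pos hlen]
    · rw [if_neg hlen, if_neg hlen]
      rw [← pv_main _ n j s hj hs]
      by_cases hsat : pvSatisfiesA (match PySem.List.pyGet? solution idx with
        | some g => (PySem.List.remove? pruned g).getD pruned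
        | none => pruned) n j s
      · rw [if_pos hsat, if_pos hsat, ih]
      · rw [if_neg hsat, if_neg hsat, ih]

-- A's removal loop returns pruned unchanged as soon as its length bound holds
theorem pv_loopA_min (solution : List (List Int)) (n j s min_groups : Int)
    (idxs : List Int) (pruned : List (List Int)) (h : (pruned.length : Int) ≤ min_groups) :
    pvLoopA solution n j s min_groups idxs pruned = pruned := by
  cases idxs with
  | nil => rfl
  | cons idx rest => simp only [pvLoopA, if_pos h]

theorem pv_nodup_pyRange (m : Nat) : (PySem.List.pyRange 0 (m : Int) 1).Nodup := by
  rw [PySem.List.pyRange_zero_natCast]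
  exact List.nodup_range.map (fun a b h => by exact_mod_cast h)

-- a fold of conditional modifies does not touch a key absent from the pair list

theorem pv_fold_getD_not_mem (q : Int × PySem.Set Int) (s : Int) :
    ∀ (E : List (Int × List Int)) (d : PySem.Dict Int (PySem.Set Int)) (ji : Int),
      ji ∉ E.map (fun p => p.1) →
      (E.foldl (fun d p =>
          if PySem.Set.len (PySem.Set.inter q.2 (PySem.Set.ofList p.2)) ≥ s
          then d.modify p.1 PySem.Set.empty (fun st => PySem.Set.add st q.1) else d) d).getD ji PySem.Set.empty
        = d.getD ji PySem.Set.empty := by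
  intro E
  induction E with
  | nil => intro d ji _; rfl
  | cons p E ih =>
    intro d ji hni
    simp only [List.map_cons, List.mem_cons, not_or] at hni
    simp only [List.foldl_cons]
    rw [ih _ ji (by exact fun h => hni.2 h)]
    split
    · rw [PySem.Dict.getD_modify, if_neg hni.1]
    · rfl

-- effect of one inner pass (over the enumerated j-combinations) on one present key

theorem pv_inner_getD (q : Int × PySem.Set Int) (s : Int) :
    ∀ (E : List (Int × List Int)) (d : PySem.Dict Int (PySem.Set Int)) (ji : Int) (jc : List Int),
      (E.map (fun p => p.1)).Nodup → (ji, jc) ∈ E →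
      (E.foldl (fun d p =>
          if PySem.Set.len (PySem.Set.inter q.2 (PySem.Set.ofList p.2)) ≥ s
          then d.modify p.1 PySem.Set.empty (fun st => PySem.Set.add st q.1) else d) d).getD ji PySem.Set.empty
        = if PySem.Set.len (PySem.Set.inter q.2 (PySem.Set.ofList jc)) ≥ s
          then PySem.Set.add (d.getD ji PySem.Set.empty) q.1 else d.getD ji PySem.Set.empty := by
  intro E
  induction E with
  | nil => intro d ji jc _ h; simp at h
  | cons p E ih =>
    intro d ji jc hnd hmem
    simp only [List.map_cons, List.nodup_cons] at hnd
    rcases List.mem_cons.mp hmem with heq | htail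
    · subst heq
      simp only [List.foldl_cons]
      rw [pv_fold_getD_not_mem q s E _ ji hnd.1]
      split
      · rw [PySem.Dict.getD_modify, if_pos rfl]
      · rfl
    · have hne : ji ≠ p.1 := by
        intro h; exact hnd.1 (h ▸ (List.mem_map.mpr ⟨(ji, jc), htail, rfl⟩))
      simp only [List.foldl_cons]
      rw [ih _ ji jc hnd.2 htail]
      have hstep : ((if PySem.Set.len (PySem.Set.inter q.2 (PySem.Set.ofList p.2)) ≥ s
          then d.modify p.1 PySem.Set.empty (fun st => PySem.Set.add st q.1) else d).getD ji PySem.Set.empty)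
          = d.getD ji PySem.Set.empty := by
        split
        · rw [PySem.Dict.getD_modify, if_neg hne]
        · rfl
      rw [hstep]

-- keys are untouched by a pass of conditional modifies at already-present keys

theorem pv_inner_keys (q : Int × PySem.Set Int) (s : Int) :
    ∀ (E : List (Int × List Int)) (d : PySem.Dict Int (PySem.Set Int)),
      (∀ p ∈ E, p.1 ∈ d.keys) →
      (E.foldl (fun d p =>
          if PySem.Set.len (PySem.Set.inter q.2 (PySem.Set.ofList p.2)) ≥ s
          then d.modify p.1 PySem.Set.empty (fun st => PySem.Set.add st q.1) else d) d).keys = d.keys := by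
  intro E
  induction E with
  | nil => intro d _; rfl
  | cons p E ih =>
    intro d hk
    simp only [List.foldl_cons]
    have hstep : (if PySem.Set.len (PySem.Set.inter q.2 (PySem.Set.ofList p.2)) ≥ s
        then d.modify p.1 PySem.Set.empty (fun st => PySem.Set.add st q.1) else d).keys = d.keys := by
      split
      · rw [PySem.Dict.keys_modify, PySem.Dict.keys_insert_of_contains]
        rw [PySem.Dict.contains_iff_mem_keys]
        exact hk p (List.mem_cons_self)
      · rfl
    rw [ih _ (fun p' hp' => by rw [hstep]; exact hk p' (List.mem_cons_of_mem _ hp')) |>.trans hstep]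

-- the initial dict: one empty set per index

theorem pv_coverage0_items (m : Nat) :
    (pvCoverage0 (m : Int)).items
      = (PySem.List.pyRange 0 (m : Int) 1).map (fun i => (i, (PySem.Set.empty : PySem.Set Int))) := by
  have h := PySem.Dict.items_foldl_insert_fresh (PySem.List.pyRange 0 (m : Int) 1)
    (fun a => a) (fun _ => (PySem.Set.empty : PySem.Set Int)) PySem.Dict.empty
    (fun a _ => by rw [PySem.Dict.contains_empty]) (by simpa using pv_nodup_pyRange m)
  simpa [pvCoverage0] using h

theorem pv_coverage0_keys (m : Nat) :
    (pvCoverage0 (m : Int)).keys = PySem.List.pyRange 0 (m : Int) 1 := by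
  show (pvCoverage0 (m : Int)).items.map (fun p => p.1) = _
  rw [pv_coverage0_items]
  simp [Function.comp_def]

-- effect of the whole double loop on one present key

theorem pv_outer_getD (s : Int) (E : List (Int × List Int))
    (hnd : (E.map (fun p => p.1)).Nodup) :
    ∀ (KS : List (Int × PySem.Set Int)) (d : PySem.Dict Int (PySem.Set Int)) (ji : Int) (jc : List Int),
      (ji, jc) ∈ E →
      (KS.foldl (fun d q =>
          E.foldl (fun d p =>
            if PySem.Set.len (PySem.Set.inter q.2 (PySem.Set.ofList p.2)) ≥ s
            then d.modify p.1 PySem.Set.empty (fun st => PySem.Set.add st q.1) else d) d) d).getD ji PySem.Set.empty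
        = KS.foldl (fun st q =>
            if PySem.Set.len (PySem.Set.inter q.2 (PySem.Set.ofList jc)) ≥ s
            then PySem.Set.add st q.1 else st) (d.getD ji PySem.Set.empty) := by
  intro KS
  induction KS with
  | nil => intro d ji jc _; rfl
  | cons q KS ih =>
    intro d ji jc hmem
    simp only [List.foldl_cons]
    rw [ih _ ji jc hmem, pv_inner_getD q s E d ji jc hnd hmem]

-- a fold of fresh conditional adds appends the filtered indices

theorem pv_fold_add (jc : List Int) (s : Int) :
    ∀ (KS : List (Int × PySem.Set Int)) (st : PySem.Set Int),
      (KS.map (fun q => q.1)).Nodup → (∀ q ∈ KS, q.1 ∉ st) →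
      KS.foldl (fun st q => if PySem.Set.len (PySem.Set.inter q.2 (PySem.Set.ofList jc)) ≥ s
          then PySem.Set.add st q.1 else st) st
        = st ++ (KS.filter (fun q => PySem.Set.len (PySem.Set.inter q.2 (PySem.Set.ofList jc)) ≥ s)).map (fun q => q.1) := by
  intro KS
  induction KS with
  | nil => intro st _ _; simp
  | cons q KS ih =>
    intro st hnd hfresh
    simp only [List.map_cons, List.nodup_cons] at hnd
    simp only [List.foldl_cons]
    by_cases hc : PySem.Set.len (PySem.Set.inter q.2 (PySem.Set.ofList jc)) ≥ s
    · rw [if_pos hc]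
      have hadd : PySem.Set.add st q.1 = st ++ [q.1] := by
        unfold PySem.Set.add
        rw [if_neg]
        simp [PySem.Set.contains, hfresh q List.mem_cons_self]
      rw [hadd, ih (st ++ [q.1]) hnd.2 ?fresh]
      · simp only [List.filter_cons, ge_iff_le] at hc ⊢
        simp only [PySem.Set.len] at hc
        simp [hc]
      case fresh =>
        intro q' hq'
        simp only [List.mem_append, List.mem_singleton, not_or]
        exact ⟨fun h => hfresh q' (List.mem_cons_of_mem _ hq') h,
               fun h => hnd.1 (h ▸ List.mem_map.mpr ⟨q', hq', rfl⟩)⟩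
    · rw [if_neg hc, ih st hnd.2 (fun q' hq' => hfresh q' (List.mem_cons_of_mem _ hq'))]
      simp only [List.filter_cons, ge_iff_le] at hc ⊢
      simp only [PySem.Set.len] at hc
      simp [hc]

theorem pv_nodup_enum_fst {α : Type} (xs : List α) :
    ((PySem.List.enumerate xs).map (fun p => p.1)).Nodup := by
  rw [PySem.List.map_fst_enumerate]
  simpa using pv_nodup_pyRange xs.length

theorem pv_final_keys (sets : List (PySem.Set Int)) (jCombs : List (List Int)) (s : Int) :
    (pvCoverage sets jCombs s).keys = PySem.List.pyRange 0 (jCombs.length : Int) 1 := by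
  unfold pvCoverage
  have aux : ∀ (KS : List (Int × PySem.Set Int)) (d : PySem.Dict Int (PySem.Set Int)),
      d.keys = PySem.List.pyRange 0 (jCombs.length : Int) 1 →
      (KS.foldl (fun d q =>
          (PySem.List.enumerate jCombs).foldl (fun d p =>
            if PySem.Set.len (PySem.Set.inter q.2 (PySem.Set.ofList p.2)) ≥ s
            then d.modify p.1 PySem.Set.empty (fun st => PySem.Set.add st q.1) else d) d) d).keys
        = PySem.List.pyRange 0 (jCombs.length : Int) 1 := by
    intro KS
    induction KS with
    | nil => intro d hd; exact hd
    | cons q KS ih =>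
      intro d hd
      simp only [List.foldl_cons]
      apply ih
      rw [pv_inner_keys q s _ d ?pres, hd]
      case pres =>
        intro p hp
        rw [hd]
        have : p.1 ∈ (PySem.List.enumerate jCombs).map (fun p => p.1) := List.mem_map.mpr ⟨p, hp, rfl⟩
        rw [PySem.List.map_fst_enumerate] at this
        simpa using this
  exact aux _ _ (pv_coverage0_keys jCombs.length)

theorem pv_final_items (sets : List (PySem.Set Int)) (jCombs : List (List Int)) (s : Int) :
    (pvCoverage sets jCombs s).items
      = (PySem.List.enumerate jCombs).map (fun p => (p.1, pvCovList sets s p.2)) := by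
  have hndk : (pvCoverage sets jCombs s).keys.Nodup := by
    rw [pv_final_keys]; exact pv_nodup_pyRange jCombs.length
  rw [PySem.Dict.items_eq_map_keys _ hndk PySem.Set.empty, pv_final_keys]
  have hfst := PySem.List.map_fst_enumerate jCombs 0
  simp only [zero_add] at hfst
  rw [← hfst, List.map_map]
  apply List.map_congr_left
  intro p hp
  simp only [Function.comp_apply]
  congr 1
  -- getD of the final dict at the present key p.1
  have hmem : (p.1, p.2) ∈ PySem.List.enumerate jCombs := by simpa using hp
  unfold pvCoverage
  rw [pv_outer_getD s _ (pv_nodup_enum_fst jCombs) _ _ p.1 p.2 hmem]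
  have hd0 : (pvCoverage0 (jCombs.length : Int)).getD p.1 PySem.Set.empty = PySem.Set.empty := by
    apply PySem.Dict.getD_of_mem_items _ ?mem ?nd
    case nd => rw [pv_coverage0_keys]; exact pv_nodup_pyRange jCombs.length
    case mem =>
      rw [pv_coverage0_items]
      apply List.mem_map.mpr
      refine ⟨p.1, ?_, rfl⟩
      have : p.1 ∈ (PySem.List.enumerate jCombs).map (fun p => p.1) := List.mem_map.mpr ⟨p, hp, rfl⟩
      rw [PySem.List.map_fst_enumerate] at this
      simpa using this
  rw [hd0, pv_fold_add p.2 s _ PySem.Set.empty (pv_nodup_enum_fst sets) (by intro q _ h; simp [PySem.Set.empty] at h)]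
  rfl

theorem pv_foldl_enumerate {α β : Type} (h : β → α → β) :
    ∀ (xs : List α) (st : Int) (u : β),
      (PySem.List.enumerate xs st).foldl (fun u p => h u p.2) u = xs.foldl h u := by
  intro xs
  induction xs with
  | nil => intro st u; rfl
  | cons x xs ih =>
    intro st u
    rw [PySem.List.enumerate_cons, List.foldl_cons, List.foldl_cons, ih]

theorem pv_unique_eq (solution : List (List Int)) (n j s : Int) :
    pvUniqueA solution n j s = pvUniqueB solution n j s := by
  unfold pvUniqueA pvUniqueB
  rw [pv_final_items, List.foldl_map]
  rw [pv_foldl_enumerate (fun u jc =>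
    if PySem.Set.len (pvCovList (solution.map (fun group => PySem.Set.ofList group)) s jc) = 1 then
      PySem.List.pySetD u ((pvCovList (solution.map (fun group => PySem.Set.ofList group)) s jc).headD 0)
        (PySem.List.pyGetD u ((pvCovList (solution.map (fun group => PySem.Set.ofList group)) s jc).headD 0) 0 + 1)
    else u) (pvJCombs n j) 0]
  have hfun : (fun (u : List Int) (jc : List Int) =>
      if PySem.Set.len (pvCovList (solution.map (fun group => PySem.Set.ofList group)) s jc) = 1 then
        PySem.List.pySetD u ((pvCovList (solution.map (fun group => PySem.Set.ofList group)) s jc).headD 0)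
          (PySem.List.pyGetD u ((pvCovList (solution.map (fun group => PySem.Set.ofList group)) s jc).headD 0) 0 + 1)
      else u)
      = (fun (u : List Int) (comb : List Int) =>
      let cs := PySem.Set.ofList comb
      let covering := ((PySem.List.enumerate (solution.map (fun g => PySem.Set.ofList g))).filter
          (fun q => PySem.Set.len (PySem.Set.inter q.2 cs) ≥ s)).map (fun q => q.1)
      if covering.length = 1 then
        let i := covering.headD 0
        PySem.List.pySetD u i (PySem.List.pyGetD u i 0 + 1)
      else u) := by
    funext u jc
    simp only [pvCovList, PySem.Set.len, Nat.cast_eq_one]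
  rw [hfun]

-- ===== VERDICT (by name: the statement is the Claim_ definition above) =====
theorem prune_solution_spec : Claim_equal_prune_solution := by
  intro solution n k j s min_groups _hdom hpre
  obtain ⟨hj, hs⟩ := hpre
  have hlen : ((PySem.List.pyRange 0 n 1).length : Int) = max n 0 := by
    rw [PySem.List.length_pyRange_one]
    simp
  unfold Spec_prune_solution prune_solution prune_solution_alt
  by_cases hE : solution = [] ∨ (solution.length : Int) ≤ min_groups
  · rw [if_pos hE]
    rcases hE with hE | hE
    · subst hE
      have hR : PySem.List.pyRange 0 (([] : List (List Int)).length : Int) 1 = [] := by decide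
      rw [hR]
      rfl
    · exact pv_loopA_min _ _ _ _ _ _ _ hE
  · rw [if_neg hE]
    have hs' : 0 ≤ s ∨ j > ((PySem.List.pyRange 0 n 1).length : Int) := by
      rw [hlen]
      rcases hs with h | h | h | h
      · exact Or.inl h
      · exact Or.inr h
      · exact absurd (Or.inl h) hE
      · exact absurd (Or.inr h) hE
    rw [pv_unique_eq, pv_loop_eq solution n j s min_groups hj hs']
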